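-- pv_equiv track=rewrite | github.com/web3ToolBoxDev/aming_claw | agent/governance/coverage_check.py | _find_matching_nodes
-- ===== SOURCE A (Python) =====
-- def _find_matching_nodes(file_path: str, file_to_nodes: dict) -> list[str]:
--     """Find nodes that track a given file. Supports prefix/directory matching."""
--     nodes = set()
--
--     # Exact match
--     if file_path in file_to_nodes:
--         nodes.update(file_to_nodes[file_path])
--
--     # Prefix match (e.g., file is "agent/governance/outbox.py",
--     # node tracks "agent/governance/")
--     for tracked_path, node_ids in file_to_nodes.items():
--         if tracked_path.endswith("/") and file_path.startswith(tracked_path):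
--             nodes.update(node_ids)
--         elif file_path == tracked_path:
--             nodes.update(node_ids)
--         # Glob-like: "dbservice/" matches "dbservice/index.js"
--         elif tracked_path.endswith("/") and file_path.startswith(tracked_path):
--             nodes.update(node_ids)
--
--     return sorted(nodes)
-- ===== SOURCE B (Python) =====
-- def _find_matching_nodes(file_path: str, file_to_nodes: dict) -> list[str]:
--     """Find nodes that track a given file. Supports prefix/directory matching."""
--     candidates = [file_path[:i + 1] for i, ch in enumerate(file_path) if ch == "/"]
--     if not file_path.endswith("/"):
--         candidates.append(file_path)
--     nodes = set()
--     for c in candidates: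
--         if c in file_to_nodes:
--             nodes.update(file_to_nodes[c])
--     return sorted(nodes)
-- ===== Notes on version B (the rewrite author's own statement) =====
-- stated objective: alternative
-- what changed: Instead of scanning every dict entry and string-matching each tracked path against file_path, B enumerates file_path's directory prefixes (one per '/') plus file_path itself and looks each candidate up in the dict; cost moves from O(N*L) over entries to O(S*L) over slash positions.
import Mathlib
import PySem

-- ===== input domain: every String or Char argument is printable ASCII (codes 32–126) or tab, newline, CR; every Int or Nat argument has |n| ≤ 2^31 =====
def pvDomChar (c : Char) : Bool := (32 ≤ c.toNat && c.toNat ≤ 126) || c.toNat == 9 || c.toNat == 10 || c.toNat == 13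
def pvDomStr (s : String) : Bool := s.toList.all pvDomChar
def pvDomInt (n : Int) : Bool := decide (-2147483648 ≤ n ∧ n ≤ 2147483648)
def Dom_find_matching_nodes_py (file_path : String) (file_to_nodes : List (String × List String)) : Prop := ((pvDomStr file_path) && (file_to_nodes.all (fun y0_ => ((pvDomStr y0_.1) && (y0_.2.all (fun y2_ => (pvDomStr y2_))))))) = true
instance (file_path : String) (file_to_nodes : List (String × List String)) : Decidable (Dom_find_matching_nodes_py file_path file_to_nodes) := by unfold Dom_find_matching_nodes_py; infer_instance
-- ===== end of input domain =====

-- B replaces A's scan of every dict entry by enumerating file_path's directory prefixes and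
-- looking each one up in the dict (objective: alternative traversal of the same data).


-- ===== PORT A =====
def find_matching_nodes_py (file_path : String) (file_to_nodes : List (String × List String)) : List String :=
  let d := PySem.Dict.mk file_to_nodes
  let nodes : PySem.Set String := PySem.Set.empty
  -- if file_path in file_to_nodes: nodes.update(file_to_nodes[file_path])
  let nodes := match d.get? file_path with
    | some v => PySem.Set.update nodes v
    | none => nodes
  -- for tracked_path, node_ids in file_to_nodes.items(): …
  let nodes := file_to_nodes.foldl (fun nodes p =>
      if PySem.Str.endswith p.1 "/" && PySem.Str.startswith file_path p.1 then PySem.Set.update nodes p.2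
      else if file_path == p.1 then PySem.Set.update nodes p.2
      else if PySem.Str.endswith p.1 "/" && PySem.Str.startswith file_path p.1 then PySem.Set.update nodes p.2
      else nodes) nodes
  PySem.List.sorted nodes (fun x => x) false

-- ===== PORT B =====
-- B's candidate list: '[file_path[:i+1] for i, ch in enumerate(file_path) if ch == "/"]'
-- (file_path[:i+1] with 0 ≤ i is take (i+1) — exact) plus file_path if it does not end with "/".
def pvCandidates (file_path : String) : List String :=
  let cs := file_path.toList
  let cands := (PySem.List.enumerate cs).filterMap
      (fun p => if p.2 == '/' then some (String.ofList (cs.take (p.1.toNat + 1))) else none)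
  if !(PySem.Str.endswith file_path "/") then cands ++ [file_path] else cands

def find_matching_nodes_py_alt (file_path : String) (file_to_nodes : List (String × List String)) : List String :=
  let d := PySem.Dict.mk file_to_nodes
  let nodes := (pvCandidates file_path).foldl (fun ns c =>
      match d.get? c with
      | some v => PySem.Set.update ns v
      | none => ns) (PySem.Set.empty : PySem.Set String)
  PySem.List.sorted nodes (fun x => x) false

-- ===== PRECONDITION & SPEC =====
-- Pre_ excludes association lists with duplicate keys: those do not represent any Python dict
-- (dict() collapses duplicates before either function runs), so which entry a port uses there
-- is an artefact of the list encoding.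
def Pre_find_matching_nodes_py (file_path : String) (file_to_nodes : List (String × List String)) : Prop :=
  (file_to_nodes.map Prod.fst).Nodup
instance (file_path : String) (file_to_nodes : List (String × List String)) : Decidable (Pre_find_matching_nodes_py file_path file_to_nodes) := by unfold Pre_find_matching_nodes_py; infer_instance

def pvWitness_find_matching_nodes_py : String × (List (String × List String)) :=
  ("a/b.py", [("a/", ["n1"]), ("a/b.py", ["n2"]), ("c/", ["n3"])])

def Spec_find_matching_nodes_py (file_path : String) (file_to_nodes : List (String × List String)) (out : List String) : Prop := out = find_matching_nodes_py_alt file_path file_to_nodes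
instance (file_path : String) (file_to_nodes : List (String × List String)) (out : List String) : Decidable (Spec_find_matching_nodes_py file_path file_to_nodes out) := by unfold Spec_find_matching_nodes_py; infer_instance

-- ===== CLAIM (what is proved, stated in full; the proofs are below) =====
def Claim_equal_find_matching_nodes_py : Prop := ∀ (file_path : String) (file_to_nodes : List (String × List String)), Dom_find_matching_nodes_py file_path file_to_nodes → Pre_find_matching_nodes_py file_path file_to_nodes → Spec_find_matching_nodes_py file_path file_to_nodes (find_matching_nodes_py file_path file_to_nodes)

-- ===== LEMMAS AND PROOFS =====

-- membership in PySem.Set.update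
lemma mem_set_update (s : PySem.Set String) (ys : List String) (x : String) :
    x ∈ PySem.Set.update s ys ↔ x ∈ s ∨ x ∈ ys := by
  have h : PySem.Set.update s ys = ys.foldl (fun t b => PySem.Set.add t (id b)) s := rfl
  rw [h, PySem.Set.mem_foldl_add]
  simp

-- membership through a single-condition update loop
lemma mem_fold_if (c : String × List String → Bool) (l : List (String × List String))
    (s0 : PySem.Set String) (x : String) :
    x ∈ l.foldl (fun ns p => if c p then PySem.Set.update ns p.2 else ns) s0
    ↔ x ∈ s0 ∨ ∃ p ∈ l, c p = true ∧ x ∈ p.2 := by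
  induction l generalizing s0 with
  | nil => simp
  | cons q t ih =>
    simp only [List.foldl_cons, List.mem_cons]
    by_cases h : c q = true
    · rw [if_pos h, ih]
      simp only [mem_set_update]
      constructor
      · rintro (⟨hx | hx⟩ | ⟨p, hp, hcp, hxp⟩)
        · exact Or.inl hx
        · exact Or.inr ⟨q, Or.inl rfl, h, hx⟩
        · exact Or.inr ⟨p, Or.inr hp, hcp, hxp⟩
      · rintro (hx | ⟨p, (rfl | hp), hcp, hxp⟩)
        · exact Or.inl (Or.inl hx)
        · exact Or.inl (Or.inr hxp)
        · exact Or.inr ⟨p, hp, hcp, hxp⟩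
    · rw [if_neg h, ih]
      constructor
      · rintro (hx | ⟨p, hp, hcp, hxp⟩)
        · exact Or.inl hx
        · exact Or.inr ⟨p, Or.inr hp, hcp, hxp⟩
      · rintro (hx | ⟨p, (rfl | hp), hcp, hxp⟩)
        · exact Or.inl hx
        · exact absurd hcp h
        · exact Or.inr ⟨p, hp, hcp, hxp⟩

-- A's three-branch loop body is the single merged condition
lemma foldA_body_eq (fp : String) :
    (fun (nodes : PySem.Set String) (p : String × List String) =>
      if PySem.Str.endswith p.1 "/" && PySem.Str.startswith fp p.1 then PySem.Set.update nodes p.2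
      else if fp == p.1 then PySem.Set.update nodes p.2
      else if PySem.Str.endswith p.1 "/" && PySem.Str.startswith fp p.1 then PySem.Set.update nodes p.2
      else nodes)
    = (fun nodes p =>
      if (PySem.Str.endswith p.1 "/" && PySem.Str.startswith fp p.1) || (fp == p.1) then PySem.Set.update nodes p.2
      else nodes) := by
  funext ns p
  cases h1 : PySem.Str.endswith p.1 "/" && PySem.Str.startswith fp p.1 <;>
    cases h2 : (fp == p.1) <;>
      simp only [h1, h2, Bool.false_or, Bool.true_or, Bool.or_false, Bool.or_true,
        if_true, if_false, Bool.false_eq_true, ite_true, ite_false]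

-- membership through B's loop
lemma mem_foldB (d : PySem.Dict String (List String)) (cands : List String) (s0 : PySem.Set String) (x : String) :
    x ∈ cands.foldl (fun ns c =>
      match d.get? c with
      | some v => PySem.Set.update ns v
      | none => ns) s0
    ↔ x ∈ s0 ∨ ∃ c ∈ cands, ∃ v, d.get? c = some v ∧ x ∈ v := by
  induction cands generalizing s0 with
  | nil => simp
  | cons q t ih =>
    simp only [List.foldl_cons, List.mem_cons]
    cases hq : d.get? q with
    | none => rw [ih]; simp [hq]
    | some v => rw [ih]; simp [hq, mem_set_update]; tauto

-- directory-prefix characterisation: ks = cs.take (j+1) with cs[j] = '/'  ↔  ks ends in '/' and is a prefix of cs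
lemma take_slash_iff (cs ks : List Char) :
    (∃ j, ∃ h : j < cs.length, cs[j] = '/' ∧ ks = cs.take (j + 1)) ↔
      (['/'] <:+ ks ∧ ks <+: cs) := by
  constructor
  · rintro ⟨j, hj, hsl, rfl⟩
    refine ⟨?_, List.take_prefix _ _⟩
    rw [List.take_add_one]
    simp [List.getElem?_eq_getElem hj, hsl]
  · rintro ⟨⟨t, rfl⟩, hp⟩
    refine ⟨t.length, ?_, ?_, ?_⟩
    · have := hp.length_le; simp at this ⊢; omega
    · have hlt : t.length < (t ++ ['/']).length := by simp
      have := hp.getElem hlt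
      simpa using this.symm
    · have := List.prefix_iff_eq_take.mp hp
      simpa using this

-- candidates = exactly the tracked paths A's loop matches
lemma mem_candidates (fp k : String) :
    k ∈ pvCandidates fp ↔
      ((PySem.Str.endswith k "/" && PySem.Str.startswith fp k) || (fp == k)) = true := by
  have hends : ∀ s : String, PySem.Str.endswith s "/" = true ↔ ['/'] <:+ s.toList := by
    intro s
    have hsl : ("/" : String).toList = ['/'] := by decide
    rw [PySem.Str.endswith_eq, hsl, PySem.Chars.endswith_iff]
  have hstarts : PySem.Str.startswith fp k = true ↔ k.toList <+: fp.toList := by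
    rw [PySem.Str.startswith_eq, PySem.Chars.startswith_iff]
  have hmemloop : ∀ cs : List Char,
      (k ∈ (PySem.List.enumerate cs).filterMap
        (fun p => if p.2 == '/' then some (String.ofList (cs.take (p.1.toNat + 1))) else none)) ↔
      (∃ j, ∃ h : j < cs.length, cs[j] = '/' ∧ k.toList = cs.take (j + 1)) := by
    intro cs
    rw [List.mem_filterMap]
    constructor
    · rintro ⟨p, hp, hif⟩
      rw [PySem.List.mem_enumerate_iff] at hp
      obtain ⟨j, hj, rfl⟩ := hp
      by_cases hc : cs[j] == '/'
      · simp only [hc, if_pos] at hif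
        refine ⟨j, hj, by simpa using hc, ?_⟩
        have : k = String.ofList (cs.take (((0 : Int) + j).toNat + 1)) := by
          cases hif; rfl
        subst this
        simp
      · simp [hc] at hif
    · rintro ⟨j, hj, hsl, hk⟩
      refine ⟨((0 : Int) + j, cs[j]), ?_, ?_⟩
      · rw [PySem.List.mem_enumerate_iff]; exact ⟨j, hj, rfl⟩
      · simp only [hsl]
        simp only [beq_self_eq_true, if_pos]
        congr 1
        have : k = String.ofList (cs.take (j + 1)) := by
          apply String.ext  -- strings with equal data
          simpa using hk
        rw [this]
        congr 2
        omega
  unfold pvCandidates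
  simp only []
  by_cases hfp : PySem.Str.endswith fp "/" = true
  · rw [if_neg (by rw [hfp]; simp)]
    rw [hmemloop, take_slash_iff]
    constructor
    · rintro ⟨h1, h2⟩
      simp only [Bool.or_eq_true, Bool.and_eq_true]
      exact Or.inl ⟨(hends k).mpr h1, hstarts.mpr h2⟩
    · intro h
      simp only [Bool.or_eq_true, Bool.and_eq_true] at h
      rcases h with ⟨h1, h2⟩ | h
      · exact ⟨(hends k).mp h1, hstarts.mp h2⟩
      · have : fp = k := by simpa using h
        subst this
        exact ⟨(hends fp).mp hfp, List.prefix_refl _⟩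
  · rw [Bool.not_eq_true] at hfp
    rw [if_pos (by rw [hfp]; rfl)]
    rw [List.mem_append, hmemloop, take_slash_iff]
    simp only [List.mem_singleton]
    constructor
    · rintro (⟨h1, h2⟩ | rfl)
      · simp only [Bool.or_eq_true, Bool.and_eq_true]
        exact Or.inl ⟨(hends k).mpr h1, hstarts.mpr h2⟩
      · simp
    · intro h
      simp only [Bool.or_eq_true, Bool.and_eq_true] at h
      rcases h with ⟨h1, h2⟩ | h
      · exact Or.inl ⟨(hends k).mp h1, hstarts.mp h2⟩
      · have : fp = k := by simpa using h
        exact Or.inr this.symm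

-- both loop results are duplicate-free
lemma nodup_fold_if (c : String × List String → Bool) (l : List (String × List String))
    (s0 : PySem.Set String) (h : s0.Nodup) :
    (l.foldl (fun ns p => if c p then PySem.Set.update ns p.2 else ns) s0).Nodup := by
  induction l generalizing s0 with
  | nil => exact h
  | cons q t ih =>
    simp only [List.foldl_cons]
    by_cases hc : c q = true
    · rw [if_pos hc]; exact ih _ (PySem.Set.nodup_update _ _ h)
    · rw [if_neg hc]; exact ih _ h

lemma nodup_foldB (d : PySem.Dict String (List String)) (cands : List String) (s0 : PySem.Set String)
    (h : s0.Nodup) :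
    (cands.foldl (fun ns c =>
      match d.get? c with
      | some v => PySem.Set.update ns v
      | none => ns) s0).Nodup := by
  induction cands generalizing s0 with
  | nil => exact h
  | cons q t ih =>
    simp only [List.foldl_cons]
    cases hq : d.get? q
    · exact ih _ h
    · exact ih _ (PySem.Set.nodup_update _ _ h)

-- ===== VERDICT (by name: the statement is the Claim_ definition above) =====
theorem find_matching_nodes_py_spec : Claim_equal_find_matching_nodes_py := by
  intro fp l _hdom hpre
  unfold Spec_find_matching_nodes_py find_matching_nodes_py find_matching_nodes_py_alt
  simp only []
  set d := PySem.Dict.mk l with hd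
  have hkeys : d.keys.Nodup := by simpa [hd, PySem.Dict.keys] using hpre
  have hget : ∀ (c : String) (v : List String), d.get? c = some v ↔ (c, v) ∈ l := by
    intro c v
    rw [PySem.Dict.get?_eq_some_iff_mem_items d c v hkeys]
  apply (PySem.List.sorted_id_eq_sorted_id_iff_perm _ _).mpr
  apply (List.perm_ext_iff_of_nodup ?_ ?_).mpr
  · intro x
    rw [foldA_body_eq, mem_fold_if, mem_foldB]
    have hinit :
        (x ∈ (match d.get? fp with
              | some v => PySem.Set.update PySem.Set.empty v
              | none => (PySem.Set.empty : PySem.Set String))) ↔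
        (∃ v, d.get? fp = some v ∧ x ∈ v) := by
      cases hq : d.get? fp with
      | none => simp [PySem.Set.empty]
      | some v => simp [mem_set_update, PySem.Set.empty]
    rw [hinit]
    constructor
    · rintro (⟨v, hv, hxv⟩ | ⟨p, hp, hc, hx⟩)
      · -- the exact-match prelude: (fp, v) ∈ l and fp is itself a candidate
        refine Or.inr ⟨fp, ?_, v, hv, hxv⟩
        rw [mem_candidates]; simp
      · refine Or.inr ⟨p.1, ?_, p.2, ?_, hx⟩
        · rw [mem_candidates]; exact hc
        · exact (hget p.1 p.2).mpr hp
    · rintro (h | ⟨c, hc, v, hv, hxv⟩)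
      · simp [PySem.Set.empty] at h
      · refine Or.inr ⟨(c, v), (hget c v).mp hv, ?_, hxv⟩
        rw [← mem_candidates]; exact hc
  · rw [foldA_body_eq]
    apply nodup_fold_if
    cases hq : d.get? fp with
    | none => exact List.nodup_nil
    | some v => exact PySem.Set.nodup_update _ _ List.nodup_nil
  · exact nodup_foldB d _ _ List.nodup_nil
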